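-- pv_equiv track=rewrite | github.com/allan-tulane/sp23-recitation-08-TylerSimms | main.py | fast_MED
-- ===== SOURCE A (Python) =====
-- def fast_MED(S, T, MED={}):
--     # TODO -  implement memoization
--     if (S, T) in MED:
--         return MED[(S, T)]
--     if (S == ""):
--         return len(T)
--     if (T == ""):
--         return len(S)
--     else:
--         if (S[0] == T[0]):
--             MED[(S, T)] = fast_MED(S[1:], T[1:])
--         else:
--             MED[(S, T)] = 1 + min(fast_MED(S, T[1:]), fast_MED(S[1:], T))
--     return MED[(S, T)]
-- ===== SOURCE B (Python) =====
-- def fast_MED(S, T, MED={}):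
--     # Bottom-up DP over suffixes, one row at a time (insert/delete edit distance).
--     # MED kept only for signature compatibility; unused.
--     m = len(T)
--     row = [m - j for j in range(m + 1)]          # distances for S-suffix "" vs T[j:]
--     for i in range(len(S) - 1, -1, -1):
--         new = [0] * (m + 1)
--         new[m] = row[m] + 1                       # dist(S[i:], "") = len(S) - i
--         for j in range(m - 1, -1, -1):
--             if S[i] == T[j]:
--                 new[j] = row[j + 1]
--             else:
--                 new[j] = 1 + min(new[j + 1], row[j])
--         row = new
--     return row[0]
-- ===== Notes on version B (the rewrite author's own statement) =====
-- stated objective: faster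
-- what changed: Replaced string-slicing memoized recursion (dict keyed by (S,T) suffix pairs, O(n+m) per key operation) with an iterative bottom-up DP keeping a single row of integers indexed by position.
import Mathlib
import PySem

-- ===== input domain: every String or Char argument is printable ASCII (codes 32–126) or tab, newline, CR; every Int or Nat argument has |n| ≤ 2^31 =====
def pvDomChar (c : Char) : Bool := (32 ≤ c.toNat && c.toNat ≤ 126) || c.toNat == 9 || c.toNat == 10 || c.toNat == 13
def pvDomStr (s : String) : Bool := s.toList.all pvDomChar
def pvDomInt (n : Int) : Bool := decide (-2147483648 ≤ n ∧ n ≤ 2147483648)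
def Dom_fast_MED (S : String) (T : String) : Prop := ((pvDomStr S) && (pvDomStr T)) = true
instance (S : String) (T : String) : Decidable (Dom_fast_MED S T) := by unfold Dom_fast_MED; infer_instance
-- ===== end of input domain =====

-- B replaces A's string-slicing memoized recursion with a one-row bottom-up DP (asymptotically
-- faster in a timing run); A also mutates its default MED dict across calls, B leaves it unused.


-- ===== PORT A =====
-- A's MED dict only caches values already determined by (S, T); the recursion itself is ported.
def goA : List Char → List Char → Int
  | [], t => (t.length : Int)                                -- if S == "": return len(T)
  | s, [] => (s.length : Int)                                -- if T == "": return len(S)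
  | a :: s, b :: t =>
      if a = b then goA s t                                  -- S[0] == T[0]
      else 1 + min (goA (a :: s) t) (goA s (b :: t))
  termination_by s t => s.length + t.length
  decreasing_by all_goals simp only [List.length_cons]; all_goals omega

def fast_MED (S : String) (T : String) : Int := goA S.toList T.toList

-- ===== PORT B =====
-- one row update: row = distances of S-suffix s against every suffix of t; produce the row for c::s
def stepRowB (c : Char) : List Char → List Int → List Int
  | [], row => [row.headD 0 + 1]                             -- new[m] = row[m] + 1
  | _ :: _, [] => []                                         -- unreachable: row always has length m+1
  | b :: t', rj :: rest =>
      let tail := stepRowB c t' rest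
      (if c = b then rest.headD 0 else 1 + min (tail.headD 0) rj) :: tail

def fast_MED_alt (S : String) (T : String) : Int :=
  ((S.toList.foldr (fun c r => stepRowB c T.toList r)
      ((List.range (T.toList.length + 1)).map (fun j => ((T.toList.length - j : Nat) : Int)))).headD 0)

-- ===== PRECONDITION & SPEC =====
def Spec_fast_MED (S : String) (T : String) (out : Int) : Prop := out = fast_MED_alt S T
instance (S : String) (T : String) (out : Int) : Decidable (Spec_fast_MED S T out) := by unfold Spec_fast_MED; infer_instance

-- ===== CLAIM (what is proved, stated in full; the proofs are below) =====
def Claim_equal_fast_MED : Prop := ∀ (S : String) (T : String), Dom_fast_MED S T → Spec_fast_MED S T (fast_MED S T)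

-- ===== LEMMAS AND PROOFS =====

lemma headD_map_tails (f : List Char → Int) (t : List Char) :
    ((t.tails).map f).headD 0 = f t := by
  cases t <;> simp

lemma init_eq_tails (t : List Char) :
    (List.range (t.length + 1)).map (fun j => ((t.length - j : Nat) : Int))
      = (t.tails).map (fun t' => (t'.length : Int)) := by
  induction t with
  | nil => simp
  | cons b t' ih =>
      rw [List.range_succ_eq_map]
      simp only [List.map_cons, List.map_map, List.tails_cons, List.length_cons]
      congr 1
      rw [← ih]
      apply List.map_congr_left
      intro j _
      simp [Function.comp, Nat.succ_sub_succ]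

lemma goA_nil (s : List Char) : goA s [] = (s.length : Int) := by
  cases s <;> simp [goA]

lemma stepRow_spec (c : Char) (s t : List Char) :
    stepRowB c t ((t.tails).map (goA s)) = (t.tails).map (goA (c :: s)) := by
  induction t with
  | nil =>
      simp [stepRowB, goA_nil]
  | cons b t' ih =>
      simp only [List.tails_cons, List.map_cons, stepRowB, ih]
      congr 1
      rw [headD_map_tails, headD_map_tails]
      show _ = goA (c :: s) (b :: t')
      rw [goA]

lemma foldr_rows (s t : List Char) :
    s.foldr (fun c r => stepRowB c t r) ((List.range (t.length + 1)).map (fun j => ((t.length - j : Nat) : Int)))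
      = (t.tails).map (goA s) := by
  induction s with
  | nil =>
      rw [init_eq_tails]
      apply List.map_congr_left
      intro t' _
      simp [goA]
  | cons c s' ih =>
      simp only [List.foldr_cons, ih, stepRow_spec]

-- ===== VERDICT (by name: the statement is the Claim_ definition above) =====
theorem fast_MED_spec : Claim_equal_fast_MED := by
  intro S T _
  show fast_MED S T = fast_MED_alt S T
  unfold fast_MED fast_MED_alt
  rw [foldr_rows, headD_map_tails]
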